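-- pv_equiv track=rewrite | github.com/mzeng2/tool_warehouse | others/conponents.py | is_all_eng
-- ===== SOURCE A (Python) =====
-- def is_all_eng(strs):
--     """判断字符串是否全部英文"""
--     if strs:
--         import string
--
--         for i in strs:
--             if i not in string.ascii_lowercase + string.ascii_uppercase:
--                 return False
--         return True
--     return False
-- ===== SOURCE B (Python) =====
-- import re
--
-- def is_all_eng(strs):
--     """判断字符串是否全部英文"""
--     return bool(re.fullmatch(r'[A-Za-z]+', strs))
-- ===== Notes on version B (the rewrite author's own statement) =====
-- stated objective: idiomatic
-- what changed: The hand-written per-character scan against a 52-character membership string is replaced by a single regular-expression full-match of one-or-more ASCII letters, whose plus quantifier reproduces the empty-string False.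
import Mathlib
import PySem

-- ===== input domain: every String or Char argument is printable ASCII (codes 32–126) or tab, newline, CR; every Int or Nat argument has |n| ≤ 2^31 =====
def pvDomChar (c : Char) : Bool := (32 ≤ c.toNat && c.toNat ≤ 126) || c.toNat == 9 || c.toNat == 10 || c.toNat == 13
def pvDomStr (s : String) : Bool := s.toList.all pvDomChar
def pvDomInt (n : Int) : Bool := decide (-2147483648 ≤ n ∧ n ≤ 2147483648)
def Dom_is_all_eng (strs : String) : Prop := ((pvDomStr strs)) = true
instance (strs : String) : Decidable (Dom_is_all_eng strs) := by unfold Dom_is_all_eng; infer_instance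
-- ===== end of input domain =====

-- B replaces A's per-character scan against a 52-char membership string by one regex full-match
-- (ported as: non-empty and every character an ASCII letter); objective: idiomatic.

-- ===== PORT A =====
-- string.ascii_lowercase + string.ascii_uppercase, as A concatenates it
def pvAsciiLetters : List Char :=
  "abcdefghijklmnopqrstuvwxyz".toList ++ "ABCDEFGHIJKLMNOPQRSTUVWXYZ".toList

-- the for-loop with early 'return False'
def is_all_eng_loop : List Char → Bool
  | [] => true
  | i :: rest => if ¬ (pvAsciiLetters.contains i) then false else is_all_eng_loop rest

def is_all_eng (strs : String) : Bool :=
  if ¬ strs.toList.isEmpty then is_all_eng_loop strs.toList else false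

-- ===== PORT B =====
-- bool(re.fullmatch(r'[A-Za-z]+', strs)): the whole string is one-or-more ASCII letters
-- (exact for the r'[A-Za-z]+' pattern on any input string)
def is_all_eng_alt (strs : String) : Bool :=
  !strs.toList.isEmpty && strs.toList.all PySem.Chars.isalpha

-- ===== PRECONDITION & SPEC =====
def Spec_is_all_eng (strs : String) (out : Bool) : Prop := out = is_all_eng_alt strs
instance (strs : String) (out : Bool) : Decidable (Spec_is_all_eng strs out) := by unfold Spec_is_all_eng; infer_instance

-- ===== CLAIM (what is proved, stated in full; the proofs are below) =====
def Claim_equal_is_all_eng : Prop := ∀ (strs : String), Dom_is_all_eng strs → Spec_is_all_eng strs (is_all_eng strs)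

-- ===== LEMMAS AND PROOFS =====

theorem pv_mem_alpha (c : Char) : pvAsciiLetters.contains c = PySem.Chars.isalpha c := by
  rw [Bool.eq_iff_iff]
  simp [pvAsciiLetters, PySem.Chars.isalpha, PySem.Chars.isupper, PySem.Chars.islower,
    Char.le_def, UInt32.le_iff_toNat_le, Char.ext_iff, ← UInt32.toNat_inj]
  omega

theorem pv_loop_eq_all (l : List Char) : is_all_eng_loop l = l.all PySem.Chars.isalpha := by
  induction l with
  | nil => rfl
  | cons c rest ih =>
    simp only [is_all_eng_loop, List.all_cons, pv_mem_alpha c]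
    cases h : PySem.Chars.isalpha c <;> simp [ih]

-- ===== VERDICT (by name: the statement is the Claim_ definition above) =====
theorem is_all_eng_spec : Claim_equal_is_all_eng := by
  intro strs _
  unfold Spec_is_all_eng is_all_eng is_all_eng_alt
  rw [pv_loop_eq_all]
  cases h : strs.toList.isEmpty <;> simp
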